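-- pv_equiv track=rewrite | github.com/andreybespalov89/cathpathfinder | run_trajectory_layers.py | build_levels
-- ===== SOURCE A (Python) =====
-- from typing import Dict, Iterable, List, Tuple
--
-- def build_levels(steps_count: int) -> List[List[int]]:
--     if steps_count <= 2:
--         return []
--     intervals = [(0, steps_count - 1)]
--     levels: List[List[int]] = []
--     while intervals:
--         level_indices: List[int] = []
--         next_intervals: List[Tuple[int, int]] = []
--         for start, end in intervals:
--             if end - start <= 1:
--                 continue
--             mid = (start + end) // 2
--             level_indices.append(mid)
--             if mid - start > 1:
--                 next_intervals.append((start, mid))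
--             if end - mid > 1:
--                 next_intervals.append((mid, end))
--         if not level_indices:
--             break
--         levels.append(level_indices)
--         intervals = next_intervals
--     return levels
-- ===== SOURCE B (Python) =====
-- from typing import List
--
--
-- def _merge(xs: List[List[int]], ys: List[List[int]]) -> List[List[int]]:
--     if not xs:
--         return ys
--     if not ys:
--         return xs
--     return [xs[0] + ys[0]] + _merge(xs[1:], ys[1:])
--
--
-- def _rec(start: int, end: int) -> List[List[int]]:
--     if end - start <= 1:
--         return []
--     mid = (start + end) // 2
--     return [[mid]] + _merge(_rec(start, mid), _rec(mid, end))
--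
--
-- def build_levels(steps_count: int) -> List[List[int]]:
--     return _rec(0, steps_count - 1)
-- ===== Notes on version B (the rewrite author's own statement) =====
-- stated objective: alternative
-- what changed: Replaced the iterative breadth-first worklist of intervals with a recursive divide-and-conquer that returns each subtree's level lists and zips sibling levels together with a level-wise merge.
import Mathlib
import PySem

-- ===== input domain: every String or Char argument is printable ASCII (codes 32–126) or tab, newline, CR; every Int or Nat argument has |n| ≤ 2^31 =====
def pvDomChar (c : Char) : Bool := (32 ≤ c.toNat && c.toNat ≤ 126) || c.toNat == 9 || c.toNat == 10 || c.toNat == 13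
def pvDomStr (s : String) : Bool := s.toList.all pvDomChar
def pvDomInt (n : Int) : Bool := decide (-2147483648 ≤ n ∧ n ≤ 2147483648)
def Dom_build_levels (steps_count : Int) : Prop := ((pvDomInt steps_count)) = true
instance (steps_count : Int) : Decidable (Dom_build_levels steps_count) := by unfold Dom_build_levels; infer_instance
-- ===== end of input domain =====

-- B replaces A's iterative breadth-first interval worklist by a recursive divide-and-conquer
-- that merges the two children's level lists level-wise (objective: alternative decomposition).

-- ===== PORT A =====
-- body of A's inner `for start, end in intervals` loop, as a fold step over (level_indices, next_intervals)
def pvStepF (acc : List Int × List (Int × Int)) (p : Int × Int) : List Int × List (Int × Int) :=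
  if p.2 - p.1 ≤ 1 then acc
  else
    let mid := PySem.Int.floordiv (p.1 + p.2) 2
    let li := acc.1 ++ [mid]
    let ni := if mid - p.1 > 1 then acc.2 ++ [(p.1, mid)] else acc.2
    let ni2 := if p.2 - mid > 1 then ni ++ [(mid, p.2)] else ni
    (li, ni2)

-- the following defs/lemmas are used only to justify pvALoop's termination (cited in decreasing_by)
def pvLi (ivs : List (Int × Int)) : List Int :=
  ivs.filterMap (fun p => if p.2 - p.1 ≤ 1 then none else some (PySem.Int.floordiv (p.1 + p.2) 2))

def pvChOf (p : Int × Int) : List (Int × Int) :=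
  if p.2 - p.1 ≤ 1 then []
  else
    let m := PySem.Int.floordiv (p.1 + p.2) 2
    (if m - p.1 > 1 then [(p.1, m)] else []) ++ (if p.2 - m > 1 then [(m, p.2)] else [])

def pvCh (ivs : List (Int × Int)) : List (Int × Int) := ivs.flatMap pvChOf

def pvMu (ivs : List (Int × Int)) : Nat := (ivs.map (fun p => (p.2 - p.1 - 1).toNat)).sum

theorem pvFold_char (ivs : List (Int × Int)) (acc : List Int × List (Int × Int)) :
    List.foldl pvStepF acc ivs = (acc.1 ++ pvLi ivs, acc.2 ++ pvCh ivs) := by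
  induction ivs generalizing acc with
  | nil => simp [pvLi, pvCh]
  | cons p ivs ih =>
    obtain ⟨s, e⟩ := p
    simp only [List.foldl_cons, ih, pvStepF, pvLi, pvCh, List.filterMap_cons, List.flatMap_cons,
      pvChOf]
    split_ifs with h h1 h2 h3 <;> simp [pvLi, pvCh] <;> ac_rfl

theorem pvFold_char0 (ivs : List (Int × Int)) :
    List.foldl pvStepF ([], []) ivs = (pvLi ivs, pvCh ivs) := by
  simpa using pvFold_char ivs ([], [])

theorem pvMu_append (a b : List (Int × Int)) : pvMu (a ++ b) = pvMu a + pvMu b := by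
  simp [pvMu]

theorem pvChOf_mu (p : Int × Int) :
    pvMu (pvChOf p) + (pvLi [p]).length ≤ (p.2 - p.1 - 1).toNat := by
  obtain ⟨s, e⟩ := p
  simp only [pvChOf, pvLi, List.filterMap]
  split_ifs with h h1 h2 h3 <;>
    simp_all [pvMu, PySem.Int.floordiv_eq_ediv_of_pos (show (0:Int) < 2 by norm_num)] <;> omega

theorem pvMu_bound (ivs : List (Int × Int)) :
    pvMu (pvCh ivs) + (pvLi ivs).length ≤ pvMu ivs := by
  induction ivs with
  | nil => simp [pvMu, pvCh, pvLi]
  | cons p ivs ih =>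
    have hp := pvChOf_mu p
    have h1 : pvCh (p :: ivs) = pvChOf p ++ pvCh ivs := by simp [pvCh]
    have h2 : pvLi (p :: ivs) = pvLi [p] ++ pvLi ivs := by
      unfold pvLi; rw [show p :: ivs = [p] ++ ivs from rfl, List.filterMap_append]
    have h3 : pvMu (p :: ivs) = (p.2 - p.1 - 1).toNat + pvMu ivs := by simp [pvMu]
    rw [h1, h2, h3, pvMu_append, List.length_append]
    omega

-- A's while loop
def pvALoop (ivs : List (Int × Int)) (levels : List (List Int)) : List (List Int) :=
  let st := List.foldl pvStepF ([], []) ivs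
  if h : st.1 = [] then levels
  else pvALoop st.2 (levels ++ [st.1])
termination_by pvMu ivs
decreasing_by
  have hb := pvMu_bound ivs
  have hc := pvFold_char0 ivs
  simp only [st, List.foldl_attach] at h ⊢
  rw [hc] at h ⊢
  have hne : (pvLi ivs).length ≠ 0 := by simpa using h
  show pvMu (pvCh ivs) < pvMu ivs
  omega

def build_levels (steps_count : Int) : List (List Int) :=
  if steps_count ≤ 2 then []
  else pvALoop [(0, steps_count - 1)] []

-- ===== PORT B =====
def pvMerge : List (List Int) → List (List Int) → List (List Int)
  | [], ys => ys
  | xs, [] => xs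
  | x :: xs, y :: ys => (x ++ y) :: pvMerge xs ys

theorem pvMid_lt {s e : Int} (h : ¬ e - s ≤ 1) :
    (PySem.Int.floordiv (s + e) 2 - s).toNat < (e - s).toNat ∧
    (e - PySem.Int.floordiv (s + e) 2).toNat < (e - s).toNat := by
  rw [PySem.Int.floordiv_eq_ediv_of_pos (show (0:Int) < 2 by norm_num)]
  omega

def pvRec (s e : Int) : List (List Int) :=
  if h : e - s ≤ 1 then []
  else
    let m := PySem.Int.floordiv (s + e) 2
    [[m]] ++ pvMerge (pvRec s m) (pvRec m e)
termination_by (e - s).toNat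
decreasing_by
  · exact (pvMid_lt h).1
  · exact (pvMid_lt h).2

def build_levels_alt (steps_count : Int) : List (List Int) :=
  pvRec 0 (steps_count - 1)

-- ===== PRECONDITION & SPEC =====
def Spec_build_levels (steps_count : Int) (out : List (List Int)) : Prop := out = build_levels_alt steps_count
instance (steps_count : Int) (out : List (List Int)) : Decidable (Spec_build_levels steps_count out) := by unfold Spec_build_levels; infer_instance

-- ===== CLAIM (what is proved, stated in full; the proofs are below) =====
def Claim_equal_build_levels : Prop := ∀ (steps_count : Int), Dom_build_levels steps_count → Spec_build_levels steps_count (build_levels steps_count)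

-- ===== LEMMAS AND PROOFS =====

-- levels of a whole worklist, B-style: level-wise merge of each interval's recursive levels
def pvBL (ivs : List (Int × Int)) : List (List Int) :=
  ivs.foldr (fun p acc => pvMerge (pvRec p.1 p.2) acc) []

theorem pvMerge_nil_right (xs : List (List Int)) : pvMerge xs [] = xs := by
  cases xs <;> rfl

theorem pvMerge_assoc (a b c : List (List Int)) :
    pvMerge (pvMerge a b) c = pvMerge a (pvMerge b c) := by
  induction a generalizing b c with
  | nil => rfl
  | cons x xs ih =>
    cases b with
    | nil => rfl
    | cons y ys =>
      cases c with
      | nil => simp [pvMerge_nil_right]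
      | cons z zs => simp [pvMerge, ih]

theorem pvBL_append (xs ys : List (Int × Int)) :
    pvBL (xs ++ ys) = pvMerge (pvBL xs) (pvBL ys) := by
  induction xs with
  | nil => simp [pvBL, pvMerge]
  | cons p xs ih => simp only [pvBL, List.foldr_cons, List.cons_append] at *; rw [ih, pvMerge_assoc]

theorem pvRec_nonsplit {s e : Int} (h : e - s ≤ 1) : pvRec s e = [] := by
  rw [pvRec]; simp [h]

theorem pvRec_split {s e : Int} (h : ¬ e - s ≤ 1) :
    pvRec s e = [(s + e) / 2] :: pvBL (pvChOf (s, e)) := by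
  have hm : PySem.Int.floordiv (s + e) 2 = (s + e) / 2 :=
    PySem.Int.floordiv_eq_ediv_of_pos (by norm_num)
  have hch : pvChOf (s, e) = (if (s + e) / 2 - s > 1 then [(s, (s + e) / 2)] else [])
      ++ (if e - (s + e) / 2 > 1 then [((s + e) / 2, e)] else []) := by
    simp only [pvChOf, if_neg h, hm]
  rw [pvRec, dif_neg h]
  simp only [hm, hch, pvBL_append]
  split_ifs with h1 h2 h3
  · simp [pvBL, pvMerge_nil_right, pvMerge]
  · rw [pvRec_nonsplit (show e - (s + e) / 2 ≤ 1 by omega)]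
    simp [pvBL, pvMerge_nil_right, pvMerge]
  · rw [pvRec_nonsplit (show (s + e) / 2 - s ≤ 1 by omega)]
    simp [pvBL, pvMerge_nil_right, pvMerge]
  · rw [pvRec_nonsplit (show (s + e) / 2 - s ≤ 1 by omega),
      pvRec_nonsplit (show e - (s + e) / 2 ≤ 1 by omega)]
    simp [pvBL, pvMerge]

theorem pvBL_cons (p : Int × Int) (ivs : List (Int × Int)) :
    pvBL (p :: ivs) = pvMerge (pvRec p.1 p.2) (pvBL ivs) := rfl

theorem pvCh_cons (p : Int × Int) (ivs : List (Int × Int)) :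
    pvCh (p :: ivs) = pvChOf p ++ pvCh ivs := by simp [pvCh]

theorem pvLi_nil (ivs : List (Int × Int)) (h : pvLi ivs = []) :
    pvBL ivs = [] ∧ pvCh ivs = [] := by
  induction ivs with
  | nil => simp [pvBL, pvCh]
  | cons p ivs ih =>
    obtain ⟨s, e⟩ := p
    by_cases hs : e - s ≤ 1
    · have hs' : e ≤ 1 + s := by omega
      have hli : pvLi ((s, e) :: ivs) = pvLi ivs := by simp [pvLi, hs']
      rw [hli] at h
      obtain ⟨h1, h2⟩ := ih h
      refine ⟨?_, ?_⟩
      · rw [pvBL_cons]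
        simp only [pvRec_nonsplit hs, h1]
        rfl
      · rw [pvCh_cons]
        simp [pvChOf, hs, h2]
    · exfalso
      have hs' : ¬ e ≤ 1 + s := by omega
      simp [pvLi, hs'] at h

theorem pvBL_levels (ivs : List (Int × Int)) (h : pvLi ivs ≠ []) :
    pvBL ivs = pvLi ivs :: pvBL (pvCh ivs) := by
  induction ivs with
  | nil => simp [pvLi] at h
  | cons p ivs ih =>
    obtain ⟨s, e⟩ := p
    by_cases hs : e - s ≤ 1
    · have hs' : e ≤ 1 + s := by omega
      have hli : pvLi ((s, e) :: ivs) = pvLi ivs := by simp [pvLi, hs']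
      have hch : pvCh ((s, e) :: ivs) = pvCh ivs := by
        rw [pvCh_cons]; simp [pvChOf, hs]
      rw [hli] at h ⊢
      rw [hch, pvBL_cons]
      simp only [pvRec_nonsplit hs]
      rw [show pvMerge [] (pvBL ivs) = pvBL ivs from rfl]
      exact ih h
    · have hs' : ¬ e ≤ 1 + s := by omega
      have hli : pvLi ((s, e) :: ivs) = (s + e) / 2 :: pvLi ivs := by simp [pvLi, hs']
      rw [hli, pvCh_cons, pvBL_cons, pvRec_split hs]
      rcases hLi : pvLi ivs with _ | ⟨l, ls⟩
      · obtain ⟨hb1, hc1⟩ := pvLi_nil ivs hLi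
        simp [hb1, hc1, pvMerge_nil_right, pvMerge]
      · rw [ih (by simp [hLi]), hLi]
        simp [pvMerge, pvBL_append]

theorem pvALoop_eq (n : Nat) (ivs : List (Int × Int)) (levels : List (List Int))
    (hn : pvMu ivs ≤ n) : pvALoop ivs levels = levels ++ pvBL ivs := by
  induction n generalizing ivs levels with
  | zero =>
    rw [pvALoop.eq_def]
    simp only [pvFold_char0]
    have hb := pvMu_bound ivs
    rcases h : pvLi ivs with _ | ⟨l, ls⟩
    · simp [h, (pvLi_nil ivs h).1]
    · exfalso; rw [h] at hb; simp at hb; omega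
  | succ n ih =>
    rw [pvALoop.eq_def]
    simp only [pvFold_char0]
    rcases h : pvLi ivs with _ | ⟨l, ls⟩
    · simp [h, (pvLi_nil ivs h).1]
    · have hb := pvMu_bound ivs
      rw [h] at hb
      simp only [List.length_cons] at hb
      have : pvMu (pvCh ivs) ≤ n := by omega
      simp only [reduceDIte, List.cons_ne_nil, dite_false]
      rw [ih (pvCh ivs) _ this]
      rw [pvBL_levels ivs (by simp [h]), h]
      simp

-- ===== VERDICT (by name: the statement is the Claim_ definition above) =====
theorem build_levels_spec : Claim_equal_build_levels := by
  intro steps _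
  unfold Spec_build_levels build_levels build_levels_alt
  by_cases h : steps ≤ 2
  · rw [if_pos h, pvRec_nonsplit (by omega)]
  · rw [if_neg h, pvALoop_eq (pvMu [(0, steps - 1)]) _ _ le_rfl]
    simp [pvBL, pvMerge_nil_right]
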